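-- pv_equiv track=rewrite | github.com/Fauthog/Conveyor | modbus_ld 1/homing.py | hex_groups_to_decimal
-- ===== SOURCE A (Python) =====
-- def hex_groups_to_decimal(hex_groups):
--     if len(hex_groups) != 4 or any(not (0 <= x < 256) for x in hex_groups):
--         raise ValueError("Input must be a list of 4 integers between 0 and 255.")
--
--     # Combine the hex groups into a single 32-bit hexadecimal string
--     hex_number = ''.join(f"{x:02X}" for x in hex_groups)
--
--     # Convert the hex string to a decimal number
--     number = int(hex_number, 16)
--
--     # Check if the number is in the range of a 32-bit signed integer
--     if number >= (1 << 31):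
--         number -= (1 << 32)
--
--     return number
-- ===== SOURCE B (Python) =====
-- def hex_groups_to_decimal(hex_groups):
--     if len(hex_groups) != 4 or any(not (0 <= x < 256) for x in hex_groups):
--         raise ValueError("Input must be a list of 4 integers between 0 and 255.")
--     return int.from_bytes(bytes(hex_groups), byteorder='big', signed=True)
-- ===== Notes on version B (the rewrite author's own statement) =====
-- stated objective: idiomatic
-- what changed: Replaces the hex-string format/parse pipeline plus explicit two's-complement correction with direct signed big-endian byte decoding via int.from_bytes.
import Mathlib
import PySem

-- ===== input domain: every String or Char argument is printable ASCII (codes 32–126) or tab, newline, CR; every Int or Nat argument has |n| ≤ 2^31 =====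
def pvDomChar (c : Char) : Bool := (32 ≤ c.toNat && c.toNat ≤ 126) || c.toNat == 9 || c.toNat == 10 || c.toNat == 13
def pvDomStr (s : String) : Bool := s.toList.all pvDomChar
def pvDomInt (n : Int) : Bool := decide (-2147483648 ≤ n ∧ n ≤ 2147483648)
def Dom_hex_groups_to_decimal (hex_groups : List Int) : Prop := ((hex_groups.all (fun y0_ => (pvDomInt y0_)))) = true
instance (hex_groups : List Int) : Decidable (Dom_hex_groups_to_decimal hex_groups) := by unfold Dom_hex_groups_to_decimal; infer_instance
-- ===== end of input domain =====

-- B replaces A's hex-string format/parse pipeline and explicit sign-correction branch with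
-- direct signed big-endian byte decoding (int.from_bytes); the validation is unchanged.

-- ===== PORT A =====

-- f"{x:02X}": two uppercase hex digits of 0 ≤ x < 256 (exact on that range, the only use site)
def pvHexChar (d : Int) : Char :=
  if d < 10 then Char.ofNat (48 + d.toNat) else Char.ofNat (55 + d.toNat)

def pvFmt02X (x : Int) : List Char :=
  [pvHexChar (PySem.Int.floordiv x 16), pvHexChar (PySem.Int.mod x 16)]

-- int(s, 16): hand port, exact on the uppercase hex-digit strings produced above
def pvHexDigitVal (c : Char) : Int :=
  if c.toNat ≤ 57 then (c.toNat : Int) - 48 else (c.toNat : Int) - 55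

def pvParseHex (cs : List Char) : Int :=
  cs.foldl (fun acc c => 16 * acc + pvHexDigitVal c) 0

def hex_groups_to_decimal (hex_groups : List Int) : Int :=
  if hex_groups.length ≠ 4 ∨ hex_groups.any (fun x => !(0 ≤ x ∧ x < 256)) then
    0  -- raise ValueError: excluded by Pre_
  else
    -- hex_number = ''.join(f"{x:02X}" for x in hex_groups); number = int(hex_number, 16)
    -- if number >= (1 << 31): number -= (1 << 32)
    if pvParseHex (hex_groups.flatMap pvFmt02X) ≥ 2 ^ 31 then
      pvParseHex (hex_groups.flatMap pvFmt02X) - 2 ^ 32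
    else
      pvParseHex (hex_groups.flatMap pvFmt02X)

-- ===== PORT B =====

-- int.from_bytes(bytes(bs), byteorder='big', signed=True): hand port, exact for byte lists —
-- the leading byte carries the sign, the rest accumulate big-endian.
def pvFromBytesSignedBE (bs : List Int) : Int :=
  match bs with
  | [] => 0
  | b :: rest => rest.foldl (fun acc x => acc * 256 + x) (if 128 ≤ b then b - 256 else b)

def hex_groups_to_decimal_alt (hex_groups : List Int) : Int :=
  if hex_groups.length ≠ 4 ∨ hex_groups.any (fun x => !(0 ≤ x ∧ x < 256)) then
    0  -- raise ValueError: excluded by Pre_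
  else
    pvFromBytesSignedBE hex_groups

-- ===== PRECONDITION & SPEC =====
-- Exactly the inputs on which Python A returns (no ValueError): 4 bytes in range.
def Pre_hex_groups_to_decimal (hex_groups : List Int) : Prop :=
  hex_groups.length = 4 ∧ ∀ x ∈ hex_groups, 0 ≤ x ∧ x < 256
instance (hex_groups : List Int) : Decidable (Pre_hex_groups_to_decimal hex_groups) := by
  unfold Pre_hex_groups_to_decimal; infer_instance

def pvWitness_hex_groups_to_decimal : List Int := [255, 1, 0, 128]

def Spec_hex_groups_to_decimal (hex_groups : List Int) (out : Int) : Prop := out = hex_groups_to_decimal_alt hex_groups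
instance (hex_groups : List Int) (out : Int) : Decidable (Spec_hex_groups_to_decimal hex_groups out) := by unfold Spec_hex_groups_to_decimal; infer_instance

-- ===== CLAIM (what is proved, stated in full; the proofs are below) =====
def Claim_equal_hex_groups_to_decimal : Prop := ∀ (hex_groups : List Int), Dom_hex_groups_to_decimal hex_groups → Pre_hex_groups_to_decimal hex_groups → Spec_hex_groups_to_decimal hex_groups (hex_groups_to_decimal hex_groups)

-- ===== LEMMAS AND PROOFS =====

theorem pvHexDigitVal_hexChar (d : Int) (h0 : 0 ≤ d) (h1 : d < 16) :
    pvHexDigitVal (pvHexChar d) = d := by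
  interval_cases d <;> decide

theorem pvParseHex_fmt02X (x : Int) (h0 : 0 ≤ x) (h1 : x < 256) :
    ∀ acc : Int, (pvFmt02X x).foldl (fun acc c => 16 * acc + pvHexDigitVal c) acc
      = 256 * acc + x := by
  intro acc
  have hq : PySem.Int.floordiv x 16 = x / 16 :=
    PySem.Int.floordiv_eq_ediv_of_pos (by omega)
  have hr : PySem.Int.mod x 16 = x % 16 :=
    PySem.Int.mod_eq_emod_of_pos (by omega)
  simp only [pvFmt02X, List.foldl, hq, hr,
    pvHexDigitVal_hexChar (x / 16) (by omega) (by omega),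
    pvHexDigitVal_hexChar (x % 16) (by omega) (by omega)]
  omega

-- ===== VERDICT (by name: the statement is the Claim_ definition above) =====
theorem hex_groups_to_decimal_spec : Claim_equal_hex_groups_to_decimal := by
  intro hex_groups _hdom hpre
  obtain ⟨hlen, hrange⟩ := hpre
  unfold Spec_hex_groups_to_decimal
  match hex_groups, hlen with
  | [a, b, c, d], _ =>
    have ha := hrange a (by simp)
    have hb := hrange b (by simp)
    have hc := hrange c (by simp)
    have hd := hrange d (by simp)
    unfold hex_groups_to_decimal hex_groups_to_decimal_alt
    have hvalid : ¬ ([a, b, c, d].length ≠ 4 ∨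
        ([a, b, c, d].any fun x => !decide (0 ≤ x ∧ x < 256)) = true) := by
      simp; omega
    rw [if_neg hvalid]
    have hn : pvParseHex ([a, b, c, d].flatMap pvFmt02X)
        = ((((a * 256 + b) * 256 + c) * 256) + d) := by
      simp only [List.flatMap_cons, List.flatMap_nil, List.append_nil, pvParseHex,
        List.foldl_append, pvParseHex_fmt02X a ha.1 ha.2, pvParseHex_fmt02X b hb.1 hb.2,
        pvParseHex_fmt02X c hc.1 hc.2, pvParseHex_fmt02X d hd.1 hd.2]
      ring
    simp only [pvFromBytesSignedBE, List.foldl]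
    split_ifs <;> omega
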